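-- pv_equiv track=rewrite | github.com/daniel-reich/ubiquitous-fiesta | 5uMJmbN2uihcyEu75_6.py | weekly_salary
-- ===== SOURCE A (Python) =====
-- def weekly_salary(hours):
--   wage = 0
--   for i,d in enumerate(hours):
--     if d > 8:
--       w = 80 + (d-8)*15
--     else:
--       w = d*10
--     wage += 2*w if i > 4 else w
--   return wage
-- ===== SOURCE B (Python) =====
-- def weekly_salary(hours):
--     def pay(days):
--         return 10 * sum(days) + 5 * sum(max(d - 8, 0) for d in days)
--     return pay(hours) + pay(hours[5:])
-- ===== Notes on version B (the rewrite author's own statement) =====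
-- stated objective: alternative
-- what changed: Replaces the per-day branch (80+(d-8)*15 vs d*10) and the conditional doubling by a branchless base-plus-overtime formula pay(days)=10*sum(days)+5*sum(max(d-8,0)), paying the whole week once and the weekend tail hours[5:] once more.
import Mathlib
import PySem

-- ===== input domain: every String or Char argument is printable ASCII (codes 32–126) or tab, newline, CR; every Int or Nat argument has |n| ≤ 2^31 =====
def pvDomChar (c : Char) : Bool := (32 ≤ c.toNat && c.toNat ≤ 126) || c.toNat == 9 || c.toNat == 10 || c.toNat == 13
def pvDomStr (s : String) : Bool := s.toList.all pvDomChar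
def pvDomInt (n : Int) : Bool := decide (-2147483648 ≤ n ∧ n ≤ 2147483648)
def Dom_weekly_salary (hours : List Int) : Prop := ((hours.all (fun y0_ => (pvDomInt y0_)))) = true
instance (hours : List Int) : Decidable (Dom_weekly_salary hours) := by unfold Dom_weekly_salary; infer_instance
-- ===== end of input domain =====

-- B replaces the per-day branch and conditional doubling by the branchless identity
-- pay(days) = 10*sum(days) + 5*sum(max(d-8,0)), applied to the whole week plus the weekend tail again (alternative formulation).


-- ===== PORT A =====
def weekly_salary (hours : List Int) : Int :=
  (PySem.List.enumerate hours 0).foldl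
    (fun wage p =>
      let w : Int := if p.2 > 8 then 80 + (p.2 - 8) * 15 else p.2 * 10
      wage + (if p.1 > 4 then 2 * w else w)) 0

-- ===== PORT B =====
def pay (days : List Int) : Int :=
  10 * days.sum + 5 * (days.map (fun d => max (d - 8) 0)).sum

def weekly_salary_alt (hours : List Int) : Int :=
  pay hours + pay (PySem.List.slice hours (some 5) none)

-- ===== PRECONDITION & SPEC =====
def Spec_weekly_salary (hours : List Int) (out : Int) : Prop := out = weekly_salary_alt hours
instance (hours : List Int) (out : Int) : Decidable (Spec_weekly_salary hours out) := by unfold Spec_weekly_salary; infer_instance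

-- ===== CLAIM (what is proved, stated in full; the proofs are below) =====
def Claim_equal_weekly_salary : Prop := ∀ (hours : List Int), Dom_weekly_salary hours → Spec_weekly_salary hours (weekly_salary hours)

-- ===== LEMMAS AND PROOFS =====

-- A's per-day wage (proof helper characterising A's branch)
def dayA (d : Int) : Int := if d > 8 then 80 + (d - 8) * 15 else d * 10

theorem dayA_eq (d : Int) : dayA d = 10 * d + 5 * max (d - 8) 0 := by
  unfold dayA
  by_cases h : d > 8
  · rw [if_pos h, max_eq_left (by omega)]; ring
  · rw [if_neg h, max_eq_right (by omega)]; ring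

-- A's fold equals: pay the first (5-k) days once, the rest twice.
theorem weekly_salary_fold (xs : List Int) : ∀ (k : Int) (acc : Int), 0 ≤ k →
    (PySem.List.enumerate xs k).foldl
      (fun wage p =>
        let w : Int := if p.2 > 8 then 80 + (p.2 - 8) * 15 else p.2 * 10
        wage + (if p.1 > 4 then 2 * w else w)) acc
    = acc + ((xs.take (5 - k).toNat).map dayA).sum
        + 2 * ((xs.drop (5 - k).toNat).map dayA).sum := by
  induction xs with
  | nil => intro k acc _; simp [PySem.List.enumerate_nil]
  | cons x xs ih =>
    intro k acc hk
    rw [PySem.List.enumerate_cons]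
    simp only [List.foldl_cons]
    rw [ih (k + 1) _ (by omega)]
    by_cases h4 : k > 4
    · have h5 : (5 - k).toNat = 0 := by omega
      have h5' : (5 - (k + 1)).toNat = 0 := by omega
      simp only [h5, h5', List.take_zero, List.drop_zero, List.map_nil, List.sum_nil,
        List.map_cons, List.sum_cons, dayA, if_pos h4]
      split_ifs <;> ring
    · have h5 : (5 - k).toNat = (5 - (k + 1)).toNat + 1 := by omega
      rw [h5]
      simp only [List.take_succ_cons, List.drop_succ_cons, List.map_cons, List.sum_cons,
        dayA, if_neg h4]
      split_ifs <;> ring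

theorem pay_eq_sum_dayA (xs : List Int) : pay xs = (xs.map dayA).sum := by
  induction xs with
  | nil => simp [pay]
  | cons x xs ih =>
    simp only [pay, List.map_cons, List.sum_cons] at *
    rw [dayA_eq]; linarith

-- ===== VERDICT (by name: the statement is the Claim_ definition above) =====
theorem weekly_salary_spec : Claim_equal_weekly_salary := by
  intro hours _
  unfold Spec_weekly_salary weekly_salary weekly_salary_alt
  rw [PySem.List.slice_from hours (a := 5) (by omega)]
  rw [weekly_salary_fold hours 0 0 le_rfl]
  rw [pay_eq_sum_dayA, pay_eq_sum_dayA]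
  norm_num
  have hs : (List.map dayA hours).sum
      = (List.take (Int.toNat 5) (List.map dayA hours)).sum
        + (List.drop (Int.toNat 5) (List.map dayA hours)).sum := by
    rw [← List.sum_append, List.take_append_drop]
  linarith
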